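-- pv_equiv track=rewrite | github.com/sevaishere/performance_lab_nt | task1/task1.py | circular_array
-- ===== SOURCE A (Python) =====
-- def circular_array(n, m):
--     num = 1
--     arr = []
--     while True:
--         arr.append(num)
--         num = ((num + m - 2) % n) + 1
--         if num == 1:
--             break
--     path = ''
--     for i in arr:
--         path = path + str(i)
--     return path
-- ===== SOURCE B (Python) =====
-- def _gcd(a, b):
--     while b:
--         a, b = b, a % b
--     return a
--
-- def circular_array(n, m):
--     d = (m - 1) % n
--     length = abs(n) // _gcd(abs(n), abs(d))
--     return ''.join(str(k * d % n + 1) for k in range(length))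
-- ===== Notes on version B (the rewrite author's own statement) =====
-- stated objective: alternative
-- what changed: Replaces the repeat-until-back-to-1 while loop with a closed form: step d=(m-1)%n, cycle length |n|//gcd(|n|,|d|), and each term produced directly as k*d%n+1 joined in one pass.
import Mathlib
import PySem

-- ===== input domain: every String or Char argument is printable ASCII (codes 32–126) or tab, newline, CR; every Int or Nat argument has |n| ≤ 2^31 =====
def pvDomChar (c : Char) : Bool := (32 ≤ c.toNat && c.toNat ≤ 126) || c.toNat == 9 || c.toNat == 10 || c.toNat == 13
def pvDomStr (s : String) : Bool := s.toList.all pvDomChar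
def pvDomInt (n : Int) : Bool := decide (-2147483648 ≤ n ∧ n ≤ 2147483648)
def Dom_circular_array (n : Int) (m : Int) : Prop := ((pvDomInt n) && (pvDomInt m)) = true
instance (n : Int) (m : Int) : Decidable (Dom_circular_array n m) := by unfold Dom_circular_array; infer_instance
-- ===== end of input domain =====

-- B replaces A's repeat-until-back-to-1 loop by a closed form: step d = (m-1) % n, cycle
-- length |n| // gcd(|n|, |d|), each term k*d % n + 1 produced directly and joined once.
-- Equivalence of the return values is proved for every n ≠ 0 (n = 0 raises in both).

-- ===== PORT A =====
-- the while-loop of A: state (num, arr); fuel only makes the recursion total — the proof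
-- below shows the loop exits within |n| iterations on every n ≠ 0 (n = 0 is outside Pre_)
def caLoop (n : Int) (m : Int) : Nat → Int → List Int → List Int
  | 0, _, arr => arr
  | fuel+1, num, arr =>
    let arr2 := arr ++ [num]
    let num2 := PySem.Int.mod (num + m - 2) n + 1
    if num2 = 1 then arr2 else caLoop n m fuel num2 arr2

def circular_array (n : Int) (m : Int) : String :=
  let arr := caLoop n m n.natAbs 1 []
  arr.foldl (fun path i => path ++ PySem.Int.toStr i) ""

-- ===== PORT B =====
-- Source B's hand-written Euclid helper _gcd (its arguments are the non-negative abs values)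
def bGcd : Nat → Nat → Nat
  | a, 0 => a
  | a, b+1 => bGcd (b+1) (a % (b+1))
termination_by a b => b
decreasing_by exact Nat.mod_lt _ (Nat.succ_pos _)

def circular_array_alt (n : Int) (m : Int) : String :=
  let d := PySem.Int.mod (m - 1) n
  let len := PySem.Int.floordiv (n.natAbs : Int) (bGcd n.natAbs d.natAbs : Int)
  PySem.Str.join "" ((PySem.List.pyRange 0 len 1).map
    (fun k => PySem.Int.toStr (PySem.Int.mod (k * d) n + 1)))

-- ===== PRECONDITION & SPEC =====
-- Pre_ excludes exactly n = 0, where A (and B) raise ZeroDivisionError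
def Pre_circular_array (n : Int) (m : Int) : Prop := n ≠ 0
instance (n : Int) (m : Int) : Decidable (Pre_circular_array n m) := by
  unfold Pre_circular_array; infer_instance
def pvWitness_circular_array : Int × Int := (5, 3)
def Spec_circular_array (n : Int) (m : Int) (out : String) : Prop := out = circular_array_alt n m
instance (n : Int) (m : Int) (out : String) : Decidable (Spec_circular_array n m out) := by
  unfold Spec_circular_array; infer_instance

-- ===== CLAIM (what is proved, stated in full; the proofs are below) =====
def Claim_equal_circular_array : Prop := ∀ (n : Int) (m : Int), Dom_circular_array n m → Pre_circular_array n m → Spec_circular_array n m (circular_array n m)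

-- ===== LEMMAS AND PROOFS =====

-- the k-th value A's loop holds: k*(m-1) reduced mod n, plus 1 (d := (m-1) % n)
def stepf (n : Int) (m : Int) (k : Nat) : Int :=
  PySem.Int.mod ((k : Int) * PySem.Int.mod (m - 1) n) n + 1

-- the number of loop iterations: |n| / gcd(|n|, |d|)
def cycLen (n : Int) (m : Int) : Nat :=
  n.natAbs / Nat.gcd n.natAbs (PySem.Int.mod (m - 1) n).natAbs

lemma bGcd_eq : ∀ (b a : Nat), bGcd a b = Nat.gcd a b := by
  intro b
  induction b using Nat.strong_induction_on with
  | _ b ih =>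
    intro a
    rcases b with _ | b'
    · simp [bGcd]
    · simp only [bGcd]
      rw [ih (a % (b' + 1)) (Nat.mod_lt _ (Nat.succ_pos b')) (b' + 1)]
      rw [Nat.gcd_comm (b' + 1) (a % (b' + 1)), ← Nat.gcd_rec (b' + 1) a, Nat.gcd_comm (b' + 1) a]

lemma int_dvd_small (n x : Int) (h : n ∣ x) (h1 : -|n| < x) (h2 : x < |n|) : x = 0 := by
  by_contra hx
  have hle : |n| ≤ |x| := Int.le_of_dvd (abs_pos.mpr hx) ((abs_dvd_abs n x).mpr h)
  have : |x| < |n| := abs_lt.mpr ⟨h1, h2⟩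
  omega

lemma pymod_congr (n a b : Int) (hn : n ≠ 0) (h : n ∣ (a - b)) :
    PySem.Int.mod a n = PySem.Int.mod b n := by
  have ha := PySem.Int.floordiv_mul_add_mod a n
  have hb := PySem.Int.floordiv_mul_add_mod b n
  obtain ⟨c, hc⟩ := h
  have hd : n ∣ (PySem.Int.mod a n - PySem.Int.mod b n) := by
    refine ⟨c - PySem.Int.floordiv a n + PySem.Int.floordiv b n, ?_⟩
    linear_combination hc + ha - hb
  rcases lt_or_gt_of_ne hn with hneg | hpos
  · obtain ⟨h1a, h2a⟩ := PySem.Int.mod_neg_bounds a hneg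
    obtain ⟨h1b, h2b⟩ := PySem.Int.mod_neg_bounds b hneg
    have := int_dvd_small n _ hd (by rw [abs_of_neg hneg]; omega) (by rw [abs_of_neg hneg]; omega)
    omega
  · have h1a := PySem.Int.mod_nonneg a hpos
    have h2a := PySem.Int.mod_lt a hpos
    have h1b := PySem.Int.mod_nonneg b hpos
    have h2b := PySem.Int.mod_lt b hpos
    have := int_dvd_small n _ hd (by rw [abs_of_pos hpos]; omega) (by rw [abs_of_pos hpos]; omega)
    omega

lemma stepf_zero (n m : Int) : stepf n m 0 = 1 := by
  have h : PySem.Int.mod 0 n = 0 := (PySem.Int.mod_eq_zero_iff_dvd 0 n).mpr (dvd_zero n)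
  simp [stepf, h]

lemma stepf_succ (n m : Int) (hn : n ≠ 0) (k : Nat) :
    PySem.Int.mod (stepf n m k + m - 2) n + 1 = stepf n m (k + 1) := by
  unfold stepf
  have h1 := PySem.Int.floordiv_mul_add_mod ((k : Int) * PySem.Int.mod (m - 1) n) n
  have h2 := PySem.Int.floordiv_mul_add_mod (m - 1) n
  have h3 : PySem.Int.mod (PySem.Int.mod ((k : Int) * PySem.Int.mod (m - 1) n) n + 1 + m - 2) n
       = PySem.Int.mod (((k + 1 : Nat) : Int) * PySem.Int.mod (m - 1) n) n := by
    apply pymod_congr n _ _ hn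
    refine ⟨PySem.Int.floordiv (m - 1) n - PySem.Int.floordiv ((k : Int) * PySem.Int.mod (m - 1) n) n, ?_⟩
    push_cast
    linear_combination h1 - h2
  rw [h3]

lemma nat_dvd_iff (N D k : Nat) (hN : N ≠ 0) :
    N ∣ k * D ↔ (N / Nat.gcd N D) ∣ k := by
  set g := Nat.gcd N D with hg
  have hgpos : 0 < g := Nat.gcd_pos_of_pos_left D (Nat.pos_of_ne_zero hN)
  have haN : g * (N / g) = N := Nat.mul_div_cancel' (Nat.gcd_dvd_left N D)
  have haD : g * (D / g) = D := Nat.mul_div_cancel' (Nat.gcd_dvd_right N D)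
  have hDg : D = g * (D / g) := haD.symm
  have hco : Nat.Coprime (N / g) (D / g) := Nat.coprime_div_gcd_div_gcd hgpos
  constructor
  · intro h
    have hEq : k * D = g * (k * (D / g)) := by
      conv_lhs => rw [hDg]
      ring
    have h' : g * (N / g) ∣ g * (k * (D / g)) := by
      rw [haN, ← hEq]
      exact h
    exact hco.dvd_of_dvd_mul_right ((Nat.mul_dvd_mul_iff_left hgpos).mp h')
  · intro h
    have h1 : N ∣ g * k := by
      rw [← haN]
      exact Nat.mul_dvd_mul_left g h
    have h2 : N ∣ g * k * (D / g) := Dvd.dvd.mul_right h1 _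
    have hEq : k * D = g * k * (D / g) := by
      conv_lhs => rw [hDg]
      ring
    rw [hEq]
    exact h2

lemma stepf_eq_one_iff (n m : Int) (hn : n ≠ 0) (k : Nat) :
    stepf n m k = 1 ↔ (cycLen n m) ∣ k := by
  have h1 : stepf n m k = 1 ↔ PySem.Int.mod ((k : Int) * PySem.Int.mod (m - 1) n) n = 0 := by
    unfold stepf
    omega
  rw [h1, PySem.Int.mod_eq_zero_iff_dvd, ← Int.natAbs_dvd_natAbs, Int.natAbs_mul,
    Int.natAbs_natCast]
  exact nat_dvd_iff n.natAbs (PySem.Int.mod (m - 1) n).natAbs k (Int.natAbs_ne_zero.mpr hn)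

lemma cycLen_pos (n m : Int) (hn : n ≠ 0) : 1 ≤ cycLen n m := by
  unfold cycLen
  have hNpos : 0 < n.natAbs := Int.natAbs_pos.mpr hn
  exact Nat.div_pos (Nat.le_of_dvd hNpos (Nat.gcd_dvd_left _ _))
    (Nat.gcd_pos_of_pos_left _ hNpos)

lemma cycLen_le (n m : Int) : cycLen n m ≤ n.natAbs := Nat.div_le_self _ _

lemma caLoop_eq (n m : Int) (hn : n ≠ 0) :
    ∀ (j fuel k : Nat) (arr : List Int), 1 ≤ j → j ≤ fuel → k + j = cycLen n m →
    caLoop n m fuel (stepf n m k) arr = arr ++ (List.range j).map (fun i => stepf n m (k + i))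
  | 0, _, _, _, hj, _, _ => absurd hj (by omega)
  | j+1, 0, k, arr, hj, hf, hL => absurd hf (by omega)
  | 1, fuel+1, k, arr, hj, hf, hL => by
    rw [caLoop]
    have hnext : PySem.Int.mod (stepf n m k + m - 2) n + 1 = stepf n m (k + 1) :=
      stepf_succ n m hn k
    have hone : stepf n m (k + 1) = 1 := by
      rw [stepf_eq_one_iff n m hn (k + 1), hL]
    simp [hnext, hone, List.range_one]
  | j+2, fuel+1, k, arr, hj, hf, hL => by
    rw [caLoop]
    have hnext : PySem.Int.mod (stepf n m k + m - 2) n + 1 = stepf n m (k + 1) :=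
      stepf_succ n m hn k
    have hne : stepf n m (k + 1) ≠ 1 := by
      intro hcontra
      have hdvd := (stepf_eq_one_iff n m hn (k + 1)).mp hcontra
      have := Nat.le_of_dvd (by omega) hdvd
      omega
    have ih := caLoop_eq n m hn (j+1) fuel (k+1) (arr ++ [stepf n m k])
      (by omega) (by omega) (by omega)
    simp only [hnext]
    rw [if_neg hne, ih]
    have hlist : (List.range (j+2)).map (fun i => stepf n m (k + i))
        = stepf n m k :: (List.range (j+1)).map (fun i => stepf n m (k + 1 + i)) := by
      rw [List.range_succ_eq_map, List.map_cons, List.map_map]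
      congr 1
      apply List.map_congr_left
      intro a _
      show stepf n m (k + (a + 1)) = stepf n m (k + 1 + a)
      congr 1
      omega
    rw [hlist, List.append_assoc, List.singleton_append]

lemma join_empty_cons (s : String) (t : List String) :
    PySem.Str.join "" (s :: t) = s ++ PySem.Str.join "" t := by
  apply String.toList_inj.mp
  cases t with
  | nil => simp [PySem.Str.join]
  | cons u rest => simp [PySem.Str.join, PySem.Chars.join_cons_cons]

lemma empty_append_str (s : String) : "" ++ s = s := by
  apply String.toList_inj.mp
  simp

lemma foldl_toStr (l : List Int) :
    ∀ init : String, l.foldl (fun p i => p ++ PySem.Int.toStr i) init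
      = init ++ PySem.Str.join "" (l.map PySem.Int.toStr) := by
  induction l with
  | nil =>
    intro init
    simp [PySem.Str.join, String.append_empty]
  | cons x t ih =>
    intro init
    rw [List.foldl_cons, List.map_cons, join_empty_cons, ih, String.append_assoc]

-- ===== VERDICT (by name: the statement is the Claim_ definition above) =====
theorem circular_array_spec : Claim_equal_circular_array := by
  intro n m _ hn
  have hn' : n ≠ 0 := hn
  unfold Spec_circular_array
  simp only [circular_array, circular_array_alt]
  have h0 := caLoop_eq n m hn' (cycLen n m) n.natAbs 0 []
    (cycLen_pos n m hn') (cycLen_le n m) (by omega)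
  rw [stepf_zero] at h0
  simp only [Nat.zero_add, List.nil_append] at h0
  rw [h0, foldl_toStr, empty_append_str]
  have hlen : PySem.Int.floordiv (n.natAbs : Int)
      (bGcd n.natAbs (PySem.Int.mod (m - 1) n).natAbs : Int) = ((cycLen n m : Nat) : Int) := by
    unfold cycLen
    rw [bGcd_eq]
    exact_mod_cast PySem.Int.floordiv_natCast n.natAbs
      (Nat.gcd n.natAbs (PySem.Int.mod (m - 1) n).natAbs)
  rw [hlen]
  have hX : (((cycLen n m : Nat) : Int) - 0).toNat = cycLen n m := by simp
  rw [PySem.List.pyRange_one, hX, List.map_map, List.map_map]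
  apply congrArg (PySem.Str.join "")
  apply List.map_congr_left
  intro k _
  simp [stepf, Function.comp]
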